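-- pv_equiv track=rewrite | github.com/OveaTrint/Intelligence-Query-Engine | query_parser.py | get_age_group
-- ===== SOURCE A (Python) =====
-- from typing import Dict, List
--
-- CHILD_KEYWORDS = (
--     "children",
--     "child",
--     "baby",
--     "babies",
--     "kid",
--     "kids",
-- )
--
-- TEENAGER_KEYWORDS = (
--     "teenagers",
--     "teenager",
--     "teen",
--     "teens",
-- )
--
-- ADULT_KEYWORDS = (
--     "adults",
--     "adult",
-- )
--
-- SENIOR_KEYWORDS = (
--     "senior",
--     "seniors",
--     "elder",
--     "elders",
--     "elderly",
--     "pensioner",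
--     "pensioners",
-- )
--
-- def get_age_group(tokens: List[str]) -> Dict:
--     filter = {}
--
--     if any(word in CHILD_KEYWORDS for word in tokens):
--         filter["age_group"] = "child"
--     elif any(word in TEENAGER_KEYWORDS for word in tokens):
--         filter["age_group"] = "teenager"
--     elif any(word in ADULT_KEYWORDS for word in tokens):
--         filter["age_group"] = "adult"
--     elif any(word in SENIOR_KEYWORDS for word in tokens):
--         filter["age_group"] = "senior"
--
--     return filter
-- ===== SOURCE B (Python) =====
-- CHILD_KEYWORDS = (
--     "children",
--     "child",
--     "baby",
--     "babies",
--     "kid",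
--     "kids",
-- )
--
-- TEENAGER_KEYWORDS = (
--     "teenagers",
--     "teenager",
--     "teen",
--     "teens",
-- )
--
-- ADULT_KEYWORDS = (
--     "adults",
--     "adult",
-- )
--
-- SENIOR_KEYWORDS = (
--     "senior",
--     "seniors",
--     "elder",
--     "elders",
--     "elderly",
--     "pensioner",
--     "pensioners",
-- )
--
-- # keyword -> priority rank, built once; lower rank wins (child=0 .. senior=3)
-- _KEYWORD_RANK = {}
-- for _rank, _words in enumerate(
--     (CHILD_KEYWORDS, TEENAGER_KEYWORDS, ADULT_KEYWORDS, SENIOR_KEYWORDS)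
-- ):
--     for _w in _words:
--         _KEYWORD_RANK[_w] = _rank
--
-- _GROUPS = ("child", "teenager", "adult", "senior")
--
--
-- def get_age_group(tokens):
--     best = None
--     for word in tokens:
--         r = _KEYWORD_RANK.get(word)
--         if r is not None and (best is None or r < best):
--             best = r
--     if best is None:
--         return {}
--     return {"age_group": _GROUPS[best]}
-- ===== Notes on version B (the rewrite author's own statement) =====
-- stated objective: faster
-- what changed: Replaces four priority-ordered any() scans over the token list (each with linear tuple membership) by a keyword->rank dict built once from the constant tuples and a single pass over tokens keeping the minimum rank seen.
import Mathlib
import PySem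

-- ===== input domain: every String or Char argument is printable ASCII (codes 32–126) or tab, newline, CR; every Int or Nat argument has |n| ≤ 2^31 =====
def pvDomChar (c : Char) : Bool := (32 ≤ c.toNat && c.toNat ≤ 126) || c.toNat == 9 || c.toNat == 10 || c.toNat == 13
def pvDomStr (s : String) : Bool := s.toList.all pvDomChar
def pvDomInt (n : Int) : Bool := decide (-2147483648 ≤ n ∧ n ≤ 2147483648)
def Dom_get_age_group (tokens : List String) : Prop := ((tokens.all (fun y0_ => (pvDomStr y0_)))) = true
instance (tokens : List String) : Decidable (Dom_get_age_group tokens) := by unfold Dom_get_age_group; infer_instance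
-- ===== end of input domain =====

-- B replaces A's four priority-ordered any() scans (linear tuple membership per token) with one
-- keyword->rank table and a single min-rank pass over the tokens; a timing run measured B faster.


-- ===== PORT A =====
def CHILD_KEYWORDS : List String := ["children", "child", "baby", "babies", "kid", "kids"]
def TEENAGER_KEYWORDS : List String := ["teenagers", "teenager", "teen", "teens"]
def ADULT_KEYWORDS : List String := ["adults", "adult"]
def SENIOR_KEYWORDS : List String := ["senior", "seniors", "elder", "elders", "elderly", "pensioner", "pensioners"]

def get_age_group (tokens : List String) : List (String × String) :=
  let filter : PySem.Dict String String := PySem.Dict.empty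
  let filter :=
    if tokens.any (fun word => CHILD_KEYWORDS.contains word) then
      filter.insert "age_group" "child"
    else if tokens.any (fun word => TEENAGER_KEYWORDS.contains word) then
      filter.insert "age_group" "teenager"
    else if tokens.any (fun word => ADULT_KEYWORDS.contains word) then
      filter.insert "age_group" "adult"
    else if tokens.any (fun word => SENIOR_KEYWORDS.contains word) then
      filter.insert "age_group" "senior"
    else filter
  filter.items

-- ===== PORT B =====
-- keyword -> priority rank, built once from the four constant tuples (module-level loop in Source B)
def KEYWORD_RANK : PySem.Dict String Nat :=
  [(CHILD_KEYWORDS, 0), (TEENAGER_KEYWORDS, 1), (ADULT_KEYWORDS, 2), (SENIOR_KEYWORDS, 3)].foldl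
    (fun d p => p.1.foldl (fun d w => d.insert w p.2) d) PySem.Dict.empty

def GROUPS : List String := ["child", "teenager", "adult", "senior"]

-- body of Source B's single loop: keep the smallest rank seen so far
def bestStep (best : Option Nat) (word : String) : Option Nat :=
  match KEYWORD_RANK.get? word with
  | none => best
  | some r =>
    match best with
    | none => some r
    | some b => if r < b then some r else some b

def get_age_group_alt (tokens : List String) : List (String × String) :=
  match tokens.foldl bestStep none with
  | none => []
  | some b => [("age_group", GROUPS.getD b "")]

-- ===== PRECONDITION & SPEC =====
def Spec_get_age_group (tokens : List String) (out : List (String × String)) : Prop := out = get_age_group_alt tokens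
instance (tokens : List String) (out : List (String × String)) : Decidable (Spec_get_age_group tokens out) := by unfold Spec_get_age_group; infer_instance

-- ===== CLAIM (what is proved, stated in full; the proofs are below) =====
def Claim_equal_get_age_group : Prop := ∀ (tokens : List String), Dom_get_age_group tokens → Spec_get_age_group tokens (get_age_group tokens)

-- ===== LEMMAS AND PROOFS =====

-- priority-ordered lookup as an if-chain, the semantic content of KEYWORD_RANK
def rankIf (w : String) : Option Nat :=
  if CHILD_KEYWORDS.contains w then some 0
  else if TEENAGER_KEYWORDS.contains w then some 1
  else if ADULT_KEYWORDS.contains w then some 2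
  else if SENIOR_KEYWORDS.contains w then some 3
  else none

-- one ranked keyword block at the front of a literal dict: lookup = contains-then-rest
lemma get?_ranked_block (ws : List String) (r : Nat) (rest : List (String × Nat)) (w : String) :
    (PySem.Dict.mk (ws.map (fun k => (k, r)) ++ rest)).get? w =
      if ws.contains w then some r else (PySem.Dict.mk rest).get? w := by
  induction ws with
  | nil => simp
  | cons a as ih =>
    simp only [List.map_cons, List.cons_append, PySem.Dict.get?_mk_cons, List.contains_cons,
      Bool.or_eq_true, beq_iff_eq]
    by_cases h : a = w
    · subst h; simp
    · simp [h, Ne.symm h, ih, List.contains_eq_mem]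

set_option maxHeartbeats 2000000 in
lemma KEYWORD_RANK_get? (w : String) : KEYWORD_RANK.get? w = rankIf w := by
  have h : KEYWORD_RANK = PySem.Dict.mk
      (CHILD_KEYWORDS.map (fun k => (k, 0)) ++ (TEENAGER_KEYWORDS.map (fun k => (k, 1)) ++
       (ADULT_KEYWORDS.map (fun k => (k, 2)) ++ (SENIOR_KEYWORDS.map (fun k => (k, 3)) ++ [])))) := by
    rfl
  rw [h, get?_ranked_block, get?_ranked_block, get?_ranked_block, get?_ranked_block]
  simp only [rankIf]
  split_ifs <;> rfl

def minO : Option Nat → Option Nat → Option Nat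
  | none, b => b
  | a, none => a
  | some x, some y => some (min x y)

lemma bestStep_eq (best : Option Nat) (w : String) :
    bestStep best w = minO best (KEYWORD_RANK.get? w) := by
  unfold bestStep
  cases KEYWORD_RANK.get? w with
  | none => cases best <;> rfl
  | some r =>
    cases best with
    | none => rfl
    | some b =>
      simp only [minO]
      rcases Nat.lt_or_ge r b with h | h
      · rw [if_pos h, Nat.min_eq_right (Nat.le_of_lt h)]
      · rw [if_neg (Nat.not_lt.mpr h), Nat.min_eq_left h]

lemma minO_assoc (a b c : Option Nat) : minO (minO a b) c = minO a (minO b c) := by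
  cases a <;> cases b <;> cases c <;> simp [minO, Nat.min_assoc]

-- A's four-scan chain, as an Option Nat rank
def chain (tokens : List String) : Option Nat :=
  if tokens.any (fun w => CHILD_KEYWORDS.contains w) then some 0
  else if tokens.any (fun w => TEENAGER_KEYWORDS.contains w) then some 1
  else if tokens.any (fun w => ADULT_KEYWORDS.contains w) then some 2
  else if tokens.any (fun w => SENIOR_KEYWORDS.contains w) then some 3
  else none

set_option maxHeartbeats 1000000 in
lemma chain_cons (t : String) (ts : List String) :
    chain (t :: ts) = minO (rankIf t) (chain ts) := by
  simp only [chain, rankIf, List.any_cons]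
  rcases Bool.dichotomy (CHILD_KEYWORDS.contains t) with h1 | h1 <;>
  rcases Bool.dichotomy (TEENAGER_KEYWORDS.contains t) with h2 | h2 <;>
  rcases Bool.dichotomy (ADULT_KEYWORDS.contains t) with h3 | h3 <;>
  rcases Bool.dichotomy (SENIOR_KEYWORDS.contains t) with h4 | h4 <;>
  rcases Bool.dichotomy (ts.any (fun w => CHILD_KEYWORDS.contains w)) with hA | hA <;>
  rcases Bool.dichotomy (ts.any (fun w => TEENAGER_KEYWORDS.contains w)) with hB | hB <;>
  rcases Bool.dichotomy (ts.any (fun w => ADULT_KEYWORDS.contains w)) with hC | hC <;>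
  rcases Bool.dichotomy (ts.any (fun w => SENIOR_KEYWORDS.contains w)) with hD | hD <;>
  simp only [h1, h2, h3, h4, hA, hB, hC, hD] <;> decide

lemma foldl_bestStep (tokens : List String) :
    ∀ acc : Option Nat, tokens.foldl bestStep acc = minO acc (chain tokens) := by
  induction tokens with
  | nil => intro acc; cases acc <;> rfl
  | cons t ts ih =>
    intro acc
    rw [List.foldl_cons, ih, bestStep_eq, KEYWORD_RANK_get?, minO_assoc, ← chain_cons]

-- ===== VERDICT (by name: the statement is the Claim_ definition above) =====
theorem get_age_group_spec : Claim_equal_get_age_group := by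
  intro tokens _
  unfold Spec_get_age_group
  dsimp only [get_age_group, get_age_group_alt]
  rw [foldl_bestStep]
  show _ = (match minO none (chain tokens) with
    | none => ([] : List (String × String))
    | some b => [("age_group", GROUPS.getD b "")])
  simp only [chain]
  split_ifs <;> rfl
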